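-- pv_equiv track=rewrite | github.com/ksykma/ssafy_algorithm_study | 20230127-1.py | solution
-- ===== SOURCE A (Python) =====
-- def solution(n, arr1, arr2):
--     lst1 = []
--     lst2 = []
--     answer = []
--     for i in arr1:
--         bin1 = str(bin(i))[2:]
--         if len(bin1) < n:
--             lst1.append(bin1.zfill(n))
--         else:
--             lst1.append(bin1)
--     for j in arr2:
--         bin2 = str(bin(j))[2:]
--         if len(bin2) < n:
--             lst2.append(bin2.zfill(n))
--         else:
--             lst2.append(bin2)
--     for a in range(n):
--         num = ''
--         for b in range(n):
--             if lst1[a][b] == '0' and lst2[a][b] == '0':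
--                 num += ' '
--             else:
--                 num += '#'
--         answer.append(num)
--
--     return answer
-- ===== SOURCE B (Python) =====
-- def solution(n, arr1, arr2):
--     masks = [0] * n
--     for arr in (arr1, arr2):
--         for i in range(n):
--             s = bin(arr[i])[2:].zfill(n)
--             for j in range(n):
--                 if s[j] != '0':
--                     masks[i] |= 1 << (n - 1 - j)
--     return [''.join('#' if m >> (n - 1 - j) & 1 else ' ' for j in range(n)) for m in masks]
-- ===== Notes on version B (the rewrite author's own statement) =====
-- stated objective: alternative
-- what changed: B replaces A's two staged binary-string lists plus a nested positional character comparison with per-row integer bitmasks: one uniform pass over both arrays marks every lit column as a bit (masks[i] |= 1 << (n-1-j)), and rows are rendered from the masks by bit tests; Pre_ only excludes arrays with fewer than n entries, where the row indexing raises IndexError except when A's 'and' short-circuit accidentally skips every missing arr2 lookup.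
-- outside the precondition, e.g. on solution(1, [3], []): A returns ['#'], B raises IndexError
import Mathlib
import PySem

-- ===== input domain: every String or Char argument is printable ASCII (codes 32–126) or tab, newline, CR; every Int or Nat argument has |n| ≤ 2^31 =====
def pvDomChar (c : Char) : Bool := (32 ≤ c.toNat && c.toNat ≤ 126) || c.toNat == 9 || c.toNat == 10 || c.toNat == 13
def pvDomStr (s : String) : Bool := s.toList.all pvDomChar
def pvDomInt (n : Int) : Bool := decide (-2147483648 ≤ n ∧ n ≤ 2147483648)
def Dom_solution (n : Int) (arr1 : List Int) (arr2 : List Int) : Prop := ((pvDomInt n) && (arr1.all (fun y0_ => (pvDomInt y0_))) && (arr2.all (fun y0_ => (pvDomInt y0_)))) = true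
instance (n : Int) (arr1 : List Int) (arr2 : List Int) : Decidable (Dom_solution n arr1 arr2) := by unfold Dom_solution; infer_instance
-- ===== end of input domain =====

-- B replaces A's two binary-string lists and nested character comparison with per-row integer
-- bitmasks accumulated in one uniform pass over both arrays, rendered by bit tests
-- (objective: alternative algorithm, same asymptotic cost).

-- ===== PORT A =====
-- bin(m) for m : Nat, without the "0b" prefix (msb first); pvNatBits 0 = [] is only an
-- intermediate of the recursion, pvBinDigits supplies Python's "0".
def pvNatBits : Nat → List Char
  | 0 => []
  | (m+1) => pvNatBits ((m+1)/2) ++ [if (m+1) % 2 = 1 then '1' else '0']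
decreasing_by exact Nat.div_lt_self (Nat.succ_pos m) (by omega)

def pvBinDigits (m : Nat) : List Char := if m = 0 then ['0'] else pvNatBits m

-- str(bin(i))[2:] : for i < 0 Python gives '-0b…', whose [2:] is 'b…'
def pvBinTail (i : Int) : List Char :=
  if i < 0 then 'b' :: pvBinDigits (-i).toNat else pvBinDigits i.toNat

-- s.zfill(n); exact here because pvBinTail never starts with a sign character
def pvZfill (l : List Char) (n : Int) : List Char := List.replicate (n.toNat - l.length) '0' ++ l

-- Python A raises IndexError when a row index is out of range (excluded by Pre_);
-- the port's getD default is never reached inside Pre_.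
def solution (n : Int) (arr1 : List Int) (arr2 : List Int) : List String :=
  let lst1 := arr1.map (fun i =>
    let bin1 := pvBinTail i
    if (bin1.length : Int) < n then pvZfill bin1 n else bin1)
  let lst2 := arr2.map (fun j =>
    let bin2 := pvBinTail j
    if (bin2.length : Int) < n then pvZfill bin2 n else bin2)
  (List.range n.toNat).map (fun a =>
    String.ofList ((List.range n.toNat).foldl (fun num b =>
      num ++ [if ((lst1.getD a []).getD b '0' == '0') && ((lst2.getD a []).getD b '0' == '0')
              then ' ' else '#']) []))

-- ===== PORT B =====
-- B's own copy of bin(m) without the prefix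
def altBits : Nat → List Char
  | 0 => []
  | (m+1) => altBits ((m+1)/2) ++ [if (m+1) % 2 = 1 then '1' else '0']
decreasing_by exact Nat.div_lt_self (Nat.succ_pos m) (by omega)

def altDigits (m : Nat) : List Char := if m = 0 then ['0'] else altBits m

-- bin(x)[2:]
def altBin (i : Int) : List Char :=
  if i < 0 then 'b' :: altDigits (-i).toNat else altDigits i.toNat

-- s.zfill(n) for a width already known to be a Nat (the row loop runs only for n > 0)
def altPad (l : List Char) (w : Nat) : List Char := List.replicate (w - l.length) '0' ++ l

-- the inner j-loop: masks[i] |= 1 << (n-1-j) for every j with s[j] != '0'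
-- ('1 << k' on a nonnegative Python int is the Nat shift, cast to Int)
def altMaskStep (w : Nat) (s : List Char) (m : Int) : Int :=
  (List.range w).foldl (fun m j =>
    if s.getD j '0' ≠ '0' then Int.lor m (((1 <<< (w - 1 - j) : Nat) : Int)) else m) m

-- Python B raises IndexError on short arrays (outside Pre_); the getD defaults are unreached
-- inside Pre_.  '>>' and '&' on the (nonnegative) masks are Python-exact.
def solution_alt (n : Int) (arr1 : List Int) (arr2 : List Int) : List String :=
  let w := n.toNat
  let masks := [arr1, arr2].foldl (fun masks arr =>
    (List.range w).foldl (fun ms i =>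
      ms.set i (altMaskStep w (altPad (altBin (arr.getD i 0)) w) (ms.getD i 0))) masks)
    (List.replicate w (0 : Int))
  masks.map (fun (m : Int) => String.ofList ((List.range w).map (fun j =>
    if Int.land (m >>> (w - 1 - j)) 1 ≠ 0 then '#' else ' ')))

-- ===== PRECONDITION & SPEC =====
-- Pre_ excludes inputs with fewer than n entries in arr1 or arr2: there the row indexing
-- raises IndexError, except that A may still return by accident of `and` short-circuiting
-- (lst2[a][b] is skipped when the arr1 character is non-'0') — an artefact of A's
-- evaluation order; B raises IndexError on every such input.
def Pre_solution (n : Int) (arr1 : List Int) (arr2 : List Int) : Prop :=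
  n ≤ (arr1.length : Int) ∧ n ≤ (arr2.length : Int)
instance (n : Int) (arr1 : List Int) (arr2 : List Int) : Decidable (Pre_solution n arr1 arr2) := by
  unfold Pre_solution; infer_instance

def pvWitness_solution : Int × List Int × List Int := (2, [1, 2], [2, 3])

def Spec_solution (n : Int) (arr1 : List Int) (arr2 : List Int) (out : List String) : Prop := out = solution_alt n arr1 arr2
instance (n : Int) (arr1 : List Int) (arr2 : List Int) (out : List String) : Decidable (Spec_solution n arr1 arr2 out) := by unfold Spec_solution; infer_instance

-- ===== CLAIM =====
def Claim_equal_solution : Prop := ∀ (n : Int) (arr1 : List Int) (arr2 : List Int), Dom_solution n arr1 arr2 → Pre_solution n arr1 arr2 → Spec_solution n arr1 arr2 (solution n arr1 arr2)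

-- ===== LEMMAS AND PROOFS =====

theorem altBits_eq_pvNatBits : ∀ m, altBits m = pvNatBits m := by
  intro m
  induction m using Nat.strong_induction_on with
  | _ m ih =>
    match m with
    | 0 => simp [altBits, pvNatBits]
    | (k+1) =>
      rw [altBits, pvNatBits, ih ((k+1)/2) (Nat.div_lt_self (Nat.succ_pos k) (by omega))]

theorem altBin_eq (i : Int) : altBin i = pvBinTail i := by
  unfold altBin pvBinTail altDigits pvBinDigits
  simp [altBits_eq_pvNatBits]

-- A's conditional zfill is B's unconditional pad (zfill pads only when the string is shorter)
theorem condZfill_eq_altPad (l : List Char) (nI : Int) (w : Nat) (h : nI = ((w : Nat) : Int)) :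
    (if ((l.length : Int) < nI) then pvZfill l nI else l) = altPad l w := by
  subst h
  unfold pvZfill altPad
  by_cases h : (l.length : Int) < ((w : Nat) : Int)
  · rw [if_pos h]
    have hw : ((w : Nat) : Int).toNat = w := by omega
    rw [hw]
  · rw [if_neg h]
    have : w - l.length = 0 := by omega
    rw [this, List.replicate_zero, List.nil_append]

-- a fold that sets each listed index once, reading only its own slot, acts pointwise
theorem foldl_set_getD (g : Nat → Int → Int) :
    ∀ (l : List Nat) (ms : List Int) (i : Nat), l.Nodup → (∀ x ∈ l, x < ms.length) →
      (l.foldl (fun ms j => ms.set j (g j (ms.getD j 0))) ms).getD i 0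
        = if i ∈ l then g i (ms.getD i 0) else ms.getD i 0 := by
  intro l
  induction l with
  | nil => simp
  | cons x l ih =>
    intro ms i hnd hlt
    rw [List.foldl_cons]
    have hx : x < ms.length := hlt x List.mem_cons_self
    rw [ih (ms.set x (g x (ms.getD x 0))) i hnd.of_cons
      (by intro y hy; rw [List.length_set]; exact hlt y (List.mem_cons_of_mem x hy))]
    by_cases hil : i ∈ l
    · rw [if_pos hil, if_pos (List.mem_cons_of_mem x hil)]
      have hne : i ≠ x := by
        intro h
        exact (List.nodup_cons.mp hnd).1 (h ▸ hil)
      rw [List.getD_eq_getElem?_getD, List.getElem?_set_ne (by omega), ← List.getD_eq_getElem?_getD]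
    · rw [if_neg hil]
      by_cases hix : i = x
      · subst hix
        rw [if_pos List.mem_cons_self, List.getD_eq_getElem?_getD,
          List.getElem?_set_self hx]
        simp
      · rw [if_neg (by simp [hix, hil])]
        rw [List.getD_eq_getElem?_getD, List.getElem?_set_ne (by omega), ← List.getD_eq_getElem?_getD]

theorem foldl_set_length (g : Nat → Int → Int) :
    ∀ (l : List Nat) (ms : List Int),
      (l.foldl (fun ms j => ms.set j (g j (ms.getD j 0))) ms).length = ms.length := by
  intro l
  induction l with
  | nil => simp
  | cons x l ih =>
    intro ms
    rw [List.foldl_cons, ih, List.length_set]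

-- the Nat analogue of the mask-building fold
def natMaskStep (w : Nat) (s : List Char) (l : List Nat) (m : Nat) : Nat :=
  l.foldl (fun m j => if s.getD j '0' ≠ '0' then m ||| (1 <<< (w - 1 - j)) else m) m

theorem altMaskStep_cast (w : Nat) (s : List Char) :
    ∀ (l : List Nat) (M : Nat),
      l.foldl (fun m j =>
          if s.getD j '0' ≠ '0' then Int.lor m (((1 <<< (w - 1 - j) : Nat) : Int)) else m) ((M : Nat) : Int)
        = ((natMaskStep w s l M : Nat) : Int) := by
  intro l
  induction l with
  | nil => simp [natMaskStep]
  | cons x l ih =>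
    intro M
    rw [List.foldl_cons]
    unfold natMaskStep
    rw [List.foldl_cons]
    by_cases h : s.getD x '0' ≠ '0'
    · rw [if_pos h, if_pos h]
      rw [show Int.lor ((M : Nat) : Int) (((1 <<< (w - 1 - x) : Nat) : Int))
          = (((M ||| (1 <<< (w - 1 - x)) : Nat) : Int)) from rfl]
      exact ih (M ||| (1 <<< (w - 1 - x)))
    · rw [if_neg h, if_neg h]
      exact ih M

theorem natMaskStep_testBit (w : Nat) (s : List Char) :
    ∀ (l : List Nat), (∀ x ∈ l, x < w) → ∀ (M : Nat) (t : Nat), t < w →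
      (natMaskStep w s l M).testBit t
        = (M.testBit t || (decide ((w - 1 - t) ∈ l) && (s.getD (w - 1 - t) '0' != '0'))) := by
  intro l
  induction l with
  | nil => intro _ M t ht; simp [natMaskStep]
  | cons x l ih =>
    intro hlt M t ht
    have hxw : x < w := hlt x List.mem_cons_self
    unfold natMaskStep
    rw [List.foldl_cons]
    rw [show (List.foldl (fun m j => if s.getD j '0' ≠ '0' then m ||| (1 <<< (w - 1 - j)) else m)
        (if s.getD x '0' ≠ '0' then M ||| (1 <<< (w - 1 - x)) else M) l)
        = natMaskStep w s l (if s.getD x '0' ≠ '0' then M ||| (1 <<< (w - 1 - x)) else M) from rfl]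
    rw [ih (fun y hy => hlt y (List.mem_cons_of_mem x hy)) _ t ht]
    by_cases hx : (w - 1 - t) = x
    · subst hx
      by_cases hc : s.getD (w - 1 - t) '0' = '0'
      · rw [if_neg (not_not_intro hc)]
        rw [List.getD_eq_getElem?_getD] at hc
        simp [List.mem_cons, hc]
      · rw [if_pos hc]
        have htw : w - 1 - (w - 1 - t) = t := by omega
        rw [htw]
        rw [List.getD_eq_getElem?_getD] at hc
        simp [Nat.testBit_or, Nat.one_shiftLeft, List.mem_cons, hc]
    · by_cases hc : s.getD x '0' = '0'
      · rw [if_neg (not_not_intro hc)]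
        simp [List.mem_cons, hx]
      · rw [if_pos hc]
        have hne : (w - 1 - x) ≠ t := by omega
        simp [Nat.testBit_or, Nat.one_shiftLeft, List.mem_cons, hx, hne]

-- Python's  v >> k & 1 != 0  on a nonnegative int is Nat.testBit
theorem int_bit_test (x : Nat) (k : Nat) :
    (Int.land ((x : Int) >>> k) 1 ≠ 0) ↔ x.testBit k := by
  have h1 : ((x : Int) >>> (k : Nat)) = ((x >>> k : Nat) : Int) := by
    exact_mod_cast (Int.natCast_shiftRight x k).symm
  have h2 : Int.land ((x >>> k : Nat) : Int) 1 = (((x >>> k) &&& 1 : Nat) : Int) := rfl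
  rw [h1, h2]
  rw [show ((((x >>> k) &&& 1 : Nat) : Int) ≠ 0) ↔ ((x >>> k) &&& 1 ≠ 0) from by exact_mod_cast Iff.rfl]
  simp [Nat.testBit, Nat.and_one_is_mod]

-- the character of A's row-string at a column, read off the row's accumulated mask
theorem mask_char (w : Nat) (s1 s2 : List Char) (b : Nat) (hb : b < w) :
    (if (Int.land ((((natMaskStep w s2 (List.range w)
          (natMaskStep w s1 (List.range w) 0)) : Nat) : Int) >>> (w - 1 - b)) 1 ≠ 0)
      then '#' else ' ')
      = (if (s1.getD b '0' == '0') && (s2.getD b '0' == '0') then ' ' else '#') := by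
  have ht : w - 1 - b < w := by omega
  have hcol : w - 1 - (w - 1 - b) = b := by omega
  have hmem : (w - 1 - (w - 1 - b)) ∈ List.range w := by
    rw [hcol]; exact List.mem_range.mpr hb
  have h1 := natMaskStep_testBit w s1 (List.range w) (fun x hx => List.mem_range.mp hx) 0 (w - 1 - b) ht
  have h2 := natMaskStep_testBit w s2 (List.range w) (fun x hx => List.mem_range.mp hx)
    (natMaskStep w s1 (List.range w) 0) (w - 1 - b) ht
  rw [h1] at h2
  rw [hcol] at h2
  simp only [Nat.zero_testBit, Bool.false_or, decide_eq_true (List.mem_range.mpr hb),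
    Bool.true_and] at h2
  by_cases c1 : s1.getD b '0' = '0' <;> by_cases c2 : s2.getD b '0' = '0' <;>
    (rw [List.getD_eq_getElem?_getD] at c1 c2; simp [int_bit_test, h2, c1, c2])

-- ===== VERDICT =====
theorem solution_spec : Claim_equal_solution := by
  intro n arr1 arr2 _ hpre
  unfold Spec_solution solution solution_alt
  obtain ⟨hl1, hl2⟩ := hpre
  have hlen2 : ∀ arr : List Int,
      ((List.range n.toNat).foldl (fun ms i =>
        ms.set i (altMaskStep n.toNat (altPad (altBin (arr.getD i 0)) n.toNat) (ms.getD i 0)))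
        (List.replicate n.toNat (0 : Int))).length = n.toNat := by
    intro arr
    rw [foldl_set_length (fun i v => altMaskStep n.toNat (altPad (altBin (arr.getD i 0)) n.toNat) v),
      List.length_replicate]
  apply List.ext_getElem
  · simp only [List.length_map, List.length_range, List.foldl_cons, List.foldl_nil]
    rw [foldl_set_length (fun i v => altMaskStep n.toNat (altPad (altBin (arr2.getD i 0)) n.toNat) v),
      hlen2 arr1]
  intro a h1 h2
  have haN : a < n.toNat := by simpa using h1
  have ha1 : a < arr1.length := by omega
  have ha2 : a < arr2.length := by omega
  simp only [List.getElem_map, List.getElem_range, List.foldl_cons, List.foldl_nil]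
  -- the mask of row a
  have hmask :
      ((List.range n.toNat).foldl (fun ms i =>
          ms.set i (altMaskStep n.toNat (altPad (altBin (arr2.getD i 0)) n.toNat) (ms.getD i 0)))
        ((List.range n.toNat).foldl (fun ms i =>
          ms.set i (altMaskStep n.toNat (altPad (altBin (arr1.getD i 0)) n.toNat) (ms.getD i 0)))
          (List.replicate n.toNat (0 : Int)))).getD a 0
        = altMaskStep n.toNat (altPad (altBin (arr2.getD a 0)) n.toNat)
            (altMaskStep n.toNat (altPad (altBin (arr1.getD a 0)) n.toNat) 0) := by
    rw [foldl_set_getD (fun i v => altMaskStep n.toNat (altPad (altBin (arr2.getD i 0)) n.toNat) v)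
      (List.range n.toNat) _ a List.nodup_range
      (by intro y hy; rw [hlen2 arr1]; exact List.mem_range.mp hy)]
    rw [if_pos (List.mem_range.mpr haN)]
    rw [foldl_set_getD (fun i v => altMaskStep n.toNat (altPad (altBin (arr1.getD i 0)) n.toNat) v)
      (List.range n.toNat) _ a List.nodup_range
      (by intro y hy; rw [List.length_replicate]; exact List.mem_range.mp hy)]
    rw [if_pos (List.mem_range.mpr haN)]
    have hrep : (List.replicate n.toNat (0 : Int)).getD a 0 = 0 := by simp
    rw [hrep]
  have hget : ∀ (ms : List Int) (h : a < ms.length), ms[a] = ms.getD a 0 := by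
    intro ms h
    rw [List.getD_eq_getElem?_getD, List.getElem?_eq_getElem h]
    rfl
  rw [hget _ (by
    rw [foldl_set_length (fun i v => altMaskStep n.toNat (altPad (altBin (arr2.getD i 0)) n.toNat) v),
      hlen2 arr1]
    exact haN)]
  rw [hmask]
  -- both sides are strings over the same column range; compare per column
  congr 1
  rw [PySem.List.foldl_append_singleton_eq_map, List.nil_append]
  apply List.map_congr_left
  intro b hb
  have hbw : b < n.toNat := List.mem_range.mp hb
  have hx : arr1.getD a 0 = arr1[a] := by
    rw [List.getD_eq_getElem?_getD, List.getElem?_eq_getElem ha1]; rfl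
  have hy : arr2.getD a 0 = arr2[a] := by
    rw [List.getD_eq_getElem?_getD, List.getElem?_eq_getElem ha2]; rfl
  have hA1 : ((arr1.map (fun i =>
      let bin1 := pvBinTail i
      if (bin1.length : Int) < n then pvZfill bin1 n else bin1)).getD a [])
      = altPad (altBin (arr1.getD a 0)) n.toNat := by
    rw [List.getD_eq_getElem?_getD, List.getElem?_map, List.getElem?_eq_getElem ha1]
    simp only [Option.map_some, Option.getD_some]
    rw [condZfill_eq_altPad (pvBinTail arr1[a]) n n.toNat (by omega), altBin_eq, hx]
  have hA2 : ((arr2.map (fun j =>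
      let bin2 := pvBinTail j
      if (bin2.length : Int) < n then pvZfill bin2 n else bin2)).getD a [])
      = altPad (altBin (arr2.getD a 0)) n.toNat := by
    rw [List.getD_eq_getElem?_getD, List.getElem?_map, List.getElem?_eq_getElem ha2]
    simp only [Option.map_some, Option.getD_some]
    rw [condZfill_eq_altPad (pvBinTail arr2[a]) n n.toNat (by omega), altBin_eq, hy]
  rw [hA1, hA2]
  have hm1 : altMaskStep n.toNat (altPad (altBin (arr1.getD a 0)) n.toNat) 0
      = ((natMaskStep n.toNat (altPad (altBin (arr1.getD a 0)) n.toNat) (List.range n.toNat) 0 : Nat) : Int) := by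
    have h := altMaskStep_cast n.toNat (altPad (altBin (arr1.getD a 0)) n.toNat) (List.range n.toNat) 0
    simpa [altMaskStep] using h
  have hm2 : altMaskStep n.toNat (altPad (altBin (arr2.getD a 0)) n.toNat)
        ((natMaskStep n.toNat (altPad (altBin (arr1.getD a 0)) n.toNat) (List.range n.toNat) 0 : Nat) : Int)
      = ((natMaskStep n.toNat (altPad (altBin (arr2.getD a 0)) n.toNat) (List.range n.toNat)
          (natMaskStep n.toNat (altPad (altBin (arr1.getD a 0)) n.toNat) (List.range n.toNat) 0) : Nat) : Int) := by
    have h := altMaskStep_cast n.toNat (altPad (altBin (arr2.getD a 0)) n.toNat) (List.range n.toNat)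
      (natMaskStep n.toNat (altPad (altBin (arr1.getD a 0)) n.toNat) (List.range n.toNat) 0)
    simpa [altMaskStep] using h
  rw [hm1, hm2]
  exact (mask_char n.toNat (altPad (altBin (arr1.getD a 0)) n.toNat)
    (altPad (altBin (arr2.getD a 0)) n.toNat) b hbw).symm
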